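-- pv_equiv track=rewrite | github.com/yanzhenxing123/algorithms | 秋招笔试/小红书/01.py | max_retained_elements
-- ===== SOURCE A (Python) =====
-- def max_retained_elements(n, d, arr):
--     """
--     解决冲突约束问题的正确算法
--
--     题目要求：
--     1. 一次操作可以选择一对元素，并将其同时从数组中删除（数组长度减少2）
--     2. 经过若干操作后，需要保证数组中不含任何"观点相近"的元素
--     3. 目标是最大化保留的元素数量
--
--     解题思路：
--     1. 对数组排序
--     2. 贪心策略：从左到右遍历，如果相邻元素差值 <= d，则删除这对元素
--     3. 继续遍历剩余元素
--     4. 最终剩余的元素数量就是答案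
--
--     时间复杂度：O(n log n) - 排序 + O(n) 遍历
--     空间复杂度：O(1)
--
--     Args:
--         n: 数组长度
--         d: 阈值
--         arr: 数组
--
--     Returns:
--         最大保留元素数量
--     """
--     if n == 0:
--         return 0
--
--     # 对数组排序
--     arr = sorted(arr)
--
--     # 贪心策略：从左到右遍历，删除"观点相近"的元素对
--     i = 0
--     deleted_pairs = 0
--
--     while i < n - 1:
--         # 如果当前元素和下一个元素差值 <= d，删除这对元素
--         if arr[i + 1] - arr[i] <= d:
--             deleted_pairs += 1  # 记录删除的对数
--             i += 2  # 跳过这对元素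
--         else:
--             i += 1  # 继续检查下一个元素
--
--     # 最终保留的元素数量 = 总数量 - 删除的对数 * 2
--     return n - deleted_pairs * 2
-- ===== SOURCE B (Python) =====
-- def max_retained_elements(n, d, arr):
--     # Partition the sorted prefix into maximal "close-gap" blocks (consecutive
--     # elements differing by <= d); within a block of length L exactly L // 2
--     # pairs can be removed, and no pair crosses a block boundary.
--     s = sorted(arr)[:n]
--     blocks = []
--     for x in s:
--         if blocks and x - blocks[-1][-1] <= d:
--             blocks[-1].append(x)
--         else:
--             blocks.append([x])
--     return n - 2 * sum(len(b) // 2 for b in blocks)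
-- ===== Notes on version B (the rewrite author's own statement) =====
-- stated objective: alternative
-- what changed: B partitions the sorted prefix into maximal close-gap blocks and computes the removable pairs as the closed form sum(len(block)//2), instead of A's greedy index-jumping pair scan (i+=1/i+=2) over the sorted array.
-- outside the precondition, e.g. on max_retained_elements(4, 1, [1, 2]): A raises IndexError, B returns 2; on max_retained_elements(-1, 1, [1, 2, 3]): A returns -1, B returns -3
import Mathlib
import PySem

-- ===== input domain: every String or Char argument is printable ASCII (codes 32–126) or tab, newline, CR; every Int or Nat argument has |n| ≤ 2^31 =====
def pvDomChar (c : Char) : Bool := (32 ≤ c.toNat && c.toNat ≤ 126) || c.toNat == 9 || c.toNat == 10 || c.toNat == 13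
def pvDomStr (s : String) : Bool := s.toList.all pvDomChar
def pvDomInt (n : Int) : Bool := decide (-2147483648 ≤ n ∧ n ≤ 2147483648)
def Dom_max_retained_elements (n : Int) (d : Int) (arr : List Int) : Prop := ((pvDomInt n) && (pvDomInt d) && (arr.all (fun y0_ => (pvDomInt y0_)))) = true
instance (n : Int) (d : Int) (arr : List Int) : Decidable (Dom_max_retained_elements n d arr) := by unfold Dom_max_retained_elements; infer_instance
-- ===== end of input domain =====

-- B computes the removable pairs by partitioning the sorted prefix into maximal close-gap
-- blocks and summing len(block)//2, instead of A's greedy index-jumping pair scan (alternative algorithm).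

-- ===== PORT A =====
-- A's while loop: i walks the sorted array, jumping by 2 after a deleted pair, by 1 otherwise.
def pvALoop (s : List Int) (n d : Int) (i pairs : Int) : Int :=
  if _h : i < n - 1 then
    if ((PySem.List.pyGet? s (i + 1)).getD 0) - ((PySem.List.pyGet? s i).getD 0) ≤ d then
      pvALoop s n d (i + 2) (pairs + 1)
    else
      pvALoop s n d (i + 1) pairs
  else pairs
termination_by (n - 1 - i).toNat
decreasing_by all_goals omega

def max_retained_elements (n : Int) (d : Int) (arr : List Int) : Int :=
  if n = 0 then 0
  else
    let s := PySem.List.sorted arr (fun x => x) false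
    n - pvALoop s n d 0 0 * 2

-- ===== PORT B =====
-- one step of B's for-loop: append x to the last block if close to its last element,
-- else start a new block.  (blocks[-1][-1]: blocks never contains an empty block, so
-- getLastD 0 is exact where Python indexes.)
def pvStep (d : Int) (blocks : List (List Int)) (x : Int) : List (List Int) :=
  match blocks.getLast? with
  | some b =>
      if x - (b.getLastD 0) ≤ d then blocks.dropLast ++ [b ++ [x]]
      else blocks ++ [[x]]
  | none => blocks ++ [[x]]

def max_retained_elements_alt (n : Int) (d : Int) (arr : List Int) : Int :=
  let s := PySem.List.slice (PySem.List.sorted arr (fun x => x) false) none (some n)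
  let blocks := s.foldl (pvStep d) []
  n - 2 * blocks.foldl (fun acc b => acc + PySem.Int.floordiv (b.length : Int) 2) 0

-- ===== PRECONDITION & SPEC =====
-- Pre_ excludes n > len(arr), where A raises IndexError, and negative n, outside the natural
-- domain of a length parameter (there A returns the meaningless count n itself).
def Pre_max_retained_elements (n : Int) (d : Int) (arr : List Int) : Prop :=
  0 ≤ n ∧ n ≤ (arr.length : Int)
instance (n : Int) (d : Int) (arr : List Int) : Decidable (Pre_max_retained_elements n d arr) := by
  unfold Pre_max_retained_elements; infer_instance

def pvWitness_max_retained_elements : Int × Int × List Int := (2, 1, [3, 1])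

def Spec_max_retained_elements (n : Int) (d : Int) (arr : List Int) (out : Int) : Prop := out = max_retained_elements_alt n d arr
instance (n : Int) (d : Int) (arr : List Int) (out : Int) : Decidable (Spec_max_retained_elements n d arr out) := by unfold Spec_max_retained_elements; infer_instance

-- ===== CLAIM (what is proved, stated in full; the proofs are below) =====
def Claim_equal_max_retained_elements : Prop := ∀ (n : Int) (d : Int) (arr : List Int), Dom_max_retained_elements n d arr → Pre_max_retained_elements n d arr → Spec_max_retained_elements n d arr (max_retained_elements n d arr)

-- ===== LEMMAS AND PROOFS =====

-- common characterisation: number of greedily deleted adjacent pairs of a (sorted) list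
def pvGPairs (d : Int) : List Int → Int
  | x :: y :: rest => if y - x ≤ d then 1 + pvGPairs d rest else pvGPairs d (y :: rest)
  | _ => 0

theorem pvGPairs_short (d : Int) (l : List Int) (hl : l.length ≤ 1) : pvGPairs d l = 0 := by
  match l with
  | [] => rfl
  | [_] => rfl
  | _ :: _ :: _ => simp at hl

-- A-side: the index loop computes pvGPairs on the first n elements
theorem pvALoop_eq (s : List Int) (n d : Int) (hlen : n ≤ (s.length : Int)) (i pairs : Int)
    (hi : 0 ≤ i) :
    pvALoop s n d i pairs = pairs + pvGPairs d ((s.take n.toNat).drop i.toNat) := by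
  rw [pvALoop]
  split
  case isTrue h =>
    have htl : (s.take n.toNat).length = n.toNat := by rw [List.length_take]; omega
    have hlt0 : i.toNat < (s.take n.toNat).length := by omega
    have hlt1 : i.toNat + 1 < (s.take n.toNat).length := by omega
    have hs0 : i.toNat < s.length := by omega
    have hs1 : i.toNat + 1 < s.length := by omega
    have hx : PySem.List.pyGet? s i = some (s.take n.toNat)[i.toNat] := by
      rw [PySem.List.pyGet?_of_nonneg s hi]
      simp [List.getElem?_eq_getElem hs0, List.getElem_take]
    have hy : PySem.List.pyGet? s (i + 1) = some (s.take n.toNat)[i.toNat + 1] := by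
      have h1 : (i + 1).toNat = i.toNat + 1 := by omega
      rw [PySem.List.pyGet?_of_nonneg s (by omega : (0:Int) ≤ i + 1), h1]
      simp [List.getElem?_eq_getElem hs1, List.getElem_take]
    have hdrop : (s.take n.toNat).drop i.toNat
        = (s.take n.toNat)[i.toNat] :: (s.take n.toNat)[i.toNat + 1]
            :: (s.take n.toNat).drop (i.toNat + 2) := by
      rw [List.drop_eq_getElem_cons hlt0, List.drop_eq_getElem_cons hlt1]
    rw [hx, hy, hdrop]
    simp only [Option.getD_some]
    by_cases hc : (s.take n.toNat)[i.toNat + 1] - (s.take n.toNat)[i.toNat] ≤ d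
    · rw [if_pos hc]
      rw [pvALoop_eq s n d hlen (i + 2) (pairs + 1) (by omega)]
      have h2 : (i + 2).toNat = i.toNat + 2 := by omega
      simp only [pvGPairs, if_pos hc, h2]; ring
    · rw [if_neg hc]
      rw [pvALoop_eq s n d hlen (i + 1) pairs (by omega)]
      have h1 : (i + 1).toNat = i.toNat + 1 := by omega
      have hdrop1 : (s.take n.toNat).drop (i.toNat + 1)
          = (s.take n.toNat)[i.toNat + 1] :: (s.take n.toNat).drop (i.toNat + 2) := by
        rw [List.drop_eq_getElem_cons hlt1]
      rw [h1, hdrop1]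
      simp only [pvGPairs, if_neg hc]
  case isFalse h =>
    have : ((s.take n.toNat).drop i.toNat).length ≤ 1 := by
      simp [List.length_take]; omega
    rw [pvGPairs_short d _ this]; ring
termination_by (n - 1 - i).toNat
decreasing_by all_goals omega

-- B-side spec helpers: pvGo d l xs = (rest of the block whose last element so far is l,
-- the following blocks); pvChunks = the block decomposition of a list.
def pvGo (d : Int) (l : Int) : List Int → List Int × List (List Int)
  | [] => ([], [])
  | x :: xs =>
    if x - l ≤ d then (x :: (pvGo d x xs).1, (pvGo d x xs).2)
    else ([], (x :: (pvGo d x xs).1) :: (pvGo d x xs).2)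

def pvChunks (d : Int) : List Int → List (List Int)
  | [] => []
  | x :: xs => (x :: (pvGo d x xs).1) :: (pvGo d x xs).2

def pvBSum : List (List Int) → Int
  | [] => 0
  | b :: bs => ((b.length / 2 : Nat) : Int) + pvBSum bs

theorem pvBSum_foldl (bs : List (List Int)) (a : Int) :
    bs.foldl (fun acc b => acc + PySem.Int.floordiv (b.length : Int) 2) a = a + pvBSum bs := by
  induction bs generalizing a with
  | nil => simp [pvBSum]
  | cons b bs ih =>
    simp only [List.foldl_cons, pvBSum, ih]
    rw [PySem.Int.floordiv_eq_ediv_of_pos (by omega : (0:Int) < 2)]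
    omega

-- the foldl over pvStep builds exactly the chunk decomposition
theorem pvStep_foldl (d : Int) (xs : List Int) (front : List (List Int)) (b : List Int)
    (l : Int) (hb : b.getLast? = some l) :
    List.foldl (pvStep d) (front ++ [b]) xs
      = front ++ (b ++ (pvGo d l xs).1) :: (pvGo d l xs).2 := by
  induction xs generalizing front b l with
  | nil => simp [pvGo]
  | cons x xs ih =>
    have hstep : pvStep d (front ++ [b]) x
        = if x - l ≤ d then front ++ [b ++ [x]] else (front ++ [b]) ++ [[x]] := by
      simp only [pvStep, List.getLast?_concat]
      have : b.getLastD 0 = l := by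
        rw [List.getLastD_eq_getLast?, hb]; rfl
      rw [this, List.dropLast_concat]
    simp only [List.foldl_cons, hstep]
    by_cases hc : x - l ≤ d
    · rw [if_pos hc]
      rw [ih front (b ++ [x]) x List.getLast?_concat]
      simp [pvGo, hc]
    · rw [if_neg hc]
      rw [ih (front ++ [b]) [x] x rfl]
      simp [pvGo, hc]

theorem pvChunks_foldl (d : Int) (s : List Int) :
    s.foldl (pvStep d) [] = pvChunks d s := by
  cases s with
  | nil => rfl
  | cons x xs =>
    have h0 : pvStep d [] x = [] ++ [[x]] := by simp [pvStep]
    simp only [List.foldl_cons, h0]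
    rw [pvStep_foldl d xs [] [x] x rfl]
    simp [pvChunks]

-- the block sums compute the greedy pair count
theorem pvBSum_chunks (d : Int) (s : List Int) :
    pvBSum (pvChunks d s) = pvGPairs d s := by
  induction s using pvGPairs.induct d with
  | case1 x y rest hc ih =>
    cases rest with
    | nil => simp [pvChunks, pvBSum, pvGPairs, hc, pvGo]
    | cons r rs =>
      by_cases hr : r - y ≤ d
      · simp only [pvChunks, pvGo, if_pos hc, if_pos hr, pvBSum, pvGPairs,
          List.length_cons] at *
        omega
      · simp only [pvChunks, pvGo, if_pos hc, if_neg hr, pvBSum, pvGPairs,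
          List.length_cons, List.length_nil] at *
        omega
  | case2 x y rest hc ih =>
    simp only [pvChunks, pvGo, if_neg hc, pvBSum, pvGPairs, List.length_cons,
      List.length_nil] at *
    omega
  | case3 l h1 =>
    rcases l with _ | ⟨x, _ | ⟨y, r⟩⟩
    · rfl
    · simp [pvChunks, pvGo, pvBSum, pvGPairs]
    · exact (h1 x y r rfl).elim

-- ===== VERDICT (by name: the statement is the Claim_ definition above) =====
theorem max_retained_elements_spec : Claim_equal_max_retained_elements := by
  intro n d arr _ hpre
  obtain ⟨hn, hlen⟩ := hpre
  unfold Spec_max_retained_elements max_retained_elements max_retained_elements_alt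
  have hslen : n ≤ ((PySem.List.sorted arr (fun x => x) false).length : Int) := by
    simpa [PySem.List.length_sorted] using hlen
  simp only [PySem.List.slice_to _ hn, pvChunks_foldl, pvBSum_foldl, pvBSum_chunks, zero_add]
  by_cases h0 : n = 0
  · subst h0; simp [pvGPairs]
  · rw [if_neg h0]
    show n - pvALoop (PySem.List.sorted arr (fun x => x) false) n d 0 0 * 2 = _
    rw [pvALoop_eq _ n d hslen 0 0 le_rfl]
    simp only [Int.toNat_zero, List.drop_zero]
    ring
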